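-- pv_equiv track=rewrite | github.com/YeahLim/AlgorithmLevelUpCompetition | Season 1/08th_Competition/Godseye93/06/2436번.py | find
-- ===== SOURCE A (Python) =====
-- from math import sqrt
--
-- def gcd(a, b):
--     while b:
--         a, b = b, a % b
--     return a
--
-- def find(g, l):
--     factor = l // g
--     for a in range(int(sqrt(factor)), 0, -1):
--         if factor % a == 0:
--             b = factor // a
--             if gcd(a, b) == 1:
--                 return a * g, b * g
--     return None
-- ===== SOURCE B (Python) =====
-- from math import isqrt
--
-- def _blocks(m):
--     # pairwise-coprime prime-power blocks of m >= 1, by trial factorization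
--     blocks = []
--     d = 2
--     while d * d <= m:
--         if m % d == 0:
--             q = 1
--             while m % d == 0:
--                 q *= d
--                 m //= d
--             blocks.append(q)
--         d += 1
--     if m > 1:
--         blocks.append(m)
--     return blocks
--
-- def find(g, l):
--     # Prime-factorize factor = l//g into prime-power blocks; every coprime split
--     # factor = a*b with gcd(a,b)=1 has a = a product of a subset of the blocks
--     # (a "unitary divisor").  Enumerate all subset products and take the largest
--     # one not exceeding isqrt(factor); that is the sought balanced pair.
--     factor = l // g
--     if factor == 0:
--         return None
--     s = isqrt(factor)
--     products = [1]
--     for q in _blocks(factor):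
--         products = products + [p * q for p in products]
--     a = max(p for p in products if p <= s)
--     return a * g, (factor // a) * g
-- ===== Notes on version B (the rewrite author's own statement) =====
-- stated objective: alternative
-- what changed: B replaces A's descending trial scan (range(int(sqrt(factor)),0,-1) with early return and a hand-rolled gcd loop) by a number-theoretic algorithm: it prime-factorizes factor=l//g into pairwise-coprime prime-power blocks, enumerates all unitary divisors as subset products of the blocks, and returns the largest one not exceeding isqrt(factor); the proof shows a divides factor with gcd(a,factor//a)==1 exactly when a is such a subset product.
import Mathlib
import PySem

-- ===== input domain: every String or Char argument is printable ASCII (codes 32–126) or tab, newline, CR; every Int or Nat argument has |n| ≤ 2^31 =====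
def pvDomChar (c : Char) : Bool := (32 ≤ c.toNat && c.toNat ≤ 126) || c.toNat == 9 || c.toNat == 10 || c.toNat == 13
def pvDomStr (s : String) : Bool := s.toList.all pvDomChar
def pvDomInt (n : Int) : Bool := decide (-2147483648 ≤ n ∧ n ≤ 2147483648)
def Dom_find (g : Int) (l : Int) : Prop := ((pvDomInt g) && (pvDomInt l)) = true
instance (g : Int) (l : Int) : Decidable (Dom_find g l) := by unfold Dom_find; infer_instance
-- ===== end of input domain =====

-- B replaces A's descending coprime-divisor trial scan by a different algorithm: it
-- prime-factorizes factor = l//g into prime-power blocks and returns the largest subset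
-- product (unitary divisor) not exceeding isqrt(factor); same asymptotic cost.

-- ===== PORT A =====

-- port of `int(sqrt(factor))`: hand-ported as the integer square root, exact for
-- 0 ≤ factor ≤ 2^31 (the Dom_find range; the double sqrt truncates to isqrt there);
-- Python raises ValueError for factor < 0, which Pre_find excludes.
def pySqrtInt (n : Int) : Int := Int.ofNat (Nat.sqrt n.toNat)

-- A's helper `gcd(a, b)`: while b: a, b = b, a % b  (Python `%`)
def findGcd (a : Int) (b : Int) : Int :=
  if _hb : b = 0 then a
  else findGcd b (PySem.Int.mod a b)
termination_by b.natAbs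
decreasing_by
  rcases (by omega : b < 0 ∨ 0 < b) with h | h
  · have h1 := PySem.Int.mod_neg_bounds (a := a) h
    omega
  · have h1 := PySem.Int.mod_nonneg (a := a) h
    have h2 := PySem.Int.mod_lt (a := a) h
    omega

-- A's for-loop over range(int(sqrt(factor)), 0, -1) with its early returns
def findLoop (factor : Int) (g : Int) : List Int → Option (Int × Int)
  | [] => none
  | a :: rest =>
    if PySem.Int.mod factor a = 0 then
      let b := PySem.Int.floordiv factor a
      if findGcd a b = 1 then some (a * g, b * g)
      else findLoop factor g rest
    else findLoop factor g rest

def find (g : Int) (l : Int) : Option (Int × Int) :=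
  let factor := PySem.Int.floordiv l g
  findLoop factor g (PySem.List.pyRange (pySqrtInt factor) 0 (-1))

-- ===== PORT B =====

-- Source B's inner while loop `q = 1; while m % d == 0: q *= d; m //= d`, as a tail recursion on
-- the same state (q, m); the `2 ≤ d ∧ 0 < m` conjuncts only make the recursion total (Source B
-- always reaches this loop with d ≥ 2 and m ≥ 4)
def pyPullPow (d : Nat) (m : Nat) (q : Nat) : Nat × Nat :=
  if h : m % d = 0 ∧ 2 ≤ d ∧ 0 < m then pyPullPow d (m / d) (q * d)
  else (q, m)
termination_by m
decreasing_by exact Nat.div_lt_self h.2.2 h.2.1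

-- termination facts for pyBlocks: the stripped cofactor shrinks
theorem pyPullPow_snd_le (d : Nat) (m : Nat) (q : Nat) : (pyPullPow d m q).2 ≤ m := by
  induction m using Nat.strong_induction_on generalizing q with
  | _ m ih =>
    rw [pyPullPow]
    split
    · rename_i h
      exact le_trans (ih (m / d) (Nat.div_lt_self h.2.2 h.2.1) (q * d)) (Nat.div_le_self m d)
    · exact le_refl m

theorem pyPullPow_snd_lt (d : Nat) (m : Nat) (q : Nat) (h2 : 2 ≤ d) (hdm : m % d = 0)
    (hm : 0 < m) : (pyPullPow d m q).2 < m := by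
  rw [pyPullPow, dif_pos ⟨hdm, h2, hm⟩]
  exact lt_of_le_of_lt (pyPullPow_snd_le d (m / d) (q * d)) (Nat.div_lt_self hm h2)

-- Source B's `_blocks` while loop (the `2 ≤ d` conjunct only makes the recursion total;
-- Source B always starts at d = 2)
def pyBlocks (m : Nat) (d : Nat) : List Nat :=
  if hg : d * d ≤ m ∧ 2 ≤ d then
    if hd : m % d = 0 then
      let r := pyPullPow d m 1
      r.1 :: pyBlocks r.2 (d + 1)
    else pyBlocks m (d + 1)
  else if 1 < m then [m] else []
termination_by (m, m + 1 - d)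
decreasing_by
  · have hm : 0 < m := by nlinarith [hg.1, hg.2]
    exact Prod.Lex.left _ _ (pyPullPow_snd_lt d m 1 hg.2 hd hm)
  · have hdm : d ≤ m := le_trans (Nat.le_mul_of_pos_left d (by omega)) hg.1
    exact Prod.Lex.right m (by omega)

-- Source B works on nonnegative ints throughout (factor ≥ 0 on Pre_), so the helpers are
-- Nat-valued; isqrt is ported as Nat.sqrt (exact)
def find_alt (g : Int) (l : Int) : Option (Int × Int) :=
  let factor := PySem.Int.floordiv l g
  if factor = 0 then none
  else
    let f := factor.toNat
    let s := Nat.sqrt f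
    let products := (pyBlocks f 2).foldl (fun ps q => ps ++ ps.map (fun p => p * q)) [1]
    -- Source B's `max(p for p in products if p <= s)`; products always contains 1 ≤ s, so the
    -- `none` arm (Python's ValueError on an empty max) is unreachable
    match PySem.List.max? (products.filter (fun p => p ≤ s)) (fun p => p) with
    | some a => some ((a : Int) * g, ((f / a : Nat) : Int) * g)
    | none => none

-- ===== PRECONDITION & SPEC =====

-- Pre_ excludes exactly the inputs where Python A raises: g = 0 (ZeroDivisionError in l // g)
-- and l // g < 0 (ValueError in sqrt of a negative number).
def Pre_find (g : Int) (l : Int) : Prop := g ≠ 0 ∧ 0 ≤ PySem.Int.floordiv l g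
instance (g : Int) (l : Int) : Decidable (Pre_find g l) := by unfold Pre_find; infer_instance

def pvWitness_find : Int × Int := (4, 12)

def Spec_find (g : Int) (l : Int) (out : Option (Int × Int)) : Prop := out = find_alt g l
instance (g : Int) (l : Int) (out : Option (Int × Int)) : Decidable (Spec_find g l out) := by
  unfold Spec_find; infer_instance

-- ===== CLAIM (what is proved, stated in full; the proofs are below) =====
def Claim_equal_find : Prop := ∀ (g : Int) (l : Int), Dom_find g l → Pre_find g l → Spec_find g l (find g l)

-- ===== LEMMAS AND PROOFS =====

-- The divisor test A applies to a candidate a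
def Pred (factor : Int) (a : Int) : Prop :=
  PySem.Int.mod factor a = 0 ∧ Int.gcd a (PySem.Int.floordiv factor a) = 1

-- its Nat form: x is a unitary divisor of f
def UD (f : Nat) (x : Nat) : Prop := x ∣ f ∧ Nat.gcd x (f / x) = 1

-- x is a product of a subset of the blocks
inductive IsSubProd : List Nat → Nat → Prop
  | nil : IsSubProd [] 1
  | skip (q : Nat) {bs : List Nat} {x : Nat} : IsSubProd bs x → IsSubProd (q :: bs) x
  | take (q : Nat) {bs : List Nat} {x : Nat} : IsSubProd bs x → IsSubProd (q :: bs) (q * x)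

-- what _blocks returns: pairwise-coprime prime-power blocks multiplying to m
def GoodBlocks (bs : List Nat) (m : Nat) : Prop :=
  bs.prod = m ∧ (∀ q ∈ bs, ∃ p e, Nat.Prime p ∧ 1 ≤ e ∧ q = p ^ e) ∧
    List.Pairwise Nat.Coprime bs

-- descending first hit over n..1, as a recursion on n
def search (factor : Int) : Nat → Option Int
  | 0 => none
  | Nat.succ n =>
      if PySem.Int.mod factor ((n + 1 : Nat) : Int) = 0 ∧
          Int.gcd ((n + 1 : Nat) : Int) (PySem.Int.floordiv factor ((n + 1 : Nat) : Int)) = 1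
      then some ((n + 1 : Nat) : Int)
      else search factor n

theorem findGcd_natCast (b a : Nat) : findGcd (a : Int) (b : Int) = (Nat.gcd a b : Int) := by
  induction b using Nat.strong_induction_on generalizing a with
  | _ b ih =>
    rcases Nat.eq_zero_or_pos b with hb | hb
    · subst hb; rw [findGcd]; simp
    · have hbz : ((b : Int) ≠ 0) := by exact_mod_cast hb.ne'
      have hrec : Nat.gcd b (a % b) = Nat.gcd a b := by
        calc Nat.gcd b (a % b) = Nat.gcd (a % b) b := Nat.gcd_comm _ _
          _ = Nat.gcd b a := (Nat.gcd_rec b a).symm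
          _ = Nat.gcd a b := Nat.gcd_comm _ _
      rw [findGcd, dif_neg hbz, PySem.Int.mod_natCast, ih (a % b) (Nat.mod_lt a hb) b, hrec]

theorem findGcd_eq_gcd (a b : Int) (ha : 0 ≤ a) (hb : 0 ≤ b) :
    findGcd a b = (Int.gcd a b : Int) := by
  have h1 : a = ((a.toNat : Nat) : Int) := by omega
  have h2 : b = ((b.toNat : Nat) : Int) := by omega
  rw [h1, h2, findGcd_natCast]
  congr 1

theorem search_some (factor : Int) (n : Nat) (m : Int) (h : search factor n = some m) :
    Pred factor m ∧ 1 ≤ m ∧ m ≤ (n : Int) := by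
  induction n with
  | zero => simp [search] at h
  | succ n ih =>
    rw [search] at h
    split at h
    · rename_i hp
      cases h
      exact ⟨hp, by push_cast; omega, by push_cast; omega⟩
    · obtain ⟨h1, h2, h3⟩ := ih h
      exact ⟨h1, h2, by push_cast; omega⟩

theorem search_max (factor : Int) (n : Nat) (m : Int) (h : search factor n = some m) :
    ∀ x : Int, m < x → x ≤ (n : Int) → ¬ Pred factor x := by
  induction n with
  | zero => simp [search] at h
  | succ n ih =>
    rw [search] at h
    split at h
    · rename_i hp
      cases h
      intro x h1 h2
      push_cast at h1 h2
      omega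
    · rename_i hp
      intro x h1 h2
      by_cases h3 : x ≤ (n : Int)
      · exact ih h x h1 h3
      · have : x = ((n + 1 : Nat) : Int) := by push_cast at h2 ⊢; omega
        subst this
        exact hp

theorem search_none (factor : Int) (n : Nat) (h : search factor n = none) :
    ∀ x : Int, 1 ≤ x → x ≤ (n : Int) → ¬ Pred factor x := by
  induction n with
  | zero => intro x h1 h2 _; omega
  | succ n ih =>
    rw [search] at h
    split at h
    · simp at h
    · rename_i hp
      intro x h1 h2
      by_cases h3 : x ≤ (n : Int)
      · exact ih h x h1 h3
      · have : x = ((n + 1 : Nat) : Int) := by push_cast at h2 ⊢; omega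
        subst this
        exact hp

-- A's descending loop computes search over 1..n
theorem findLoop_eq (factor g : Int) (hf : 0 ≤ factor) (n : Nat) :
    findLoop factor g (PySem.List.pyRange (n : Int) 0 (-1)) =
      (search factor n).map (fun a => (a * g, PySem.Int.floordiv factor a * g)) := by
  induction n with
  | zero =>
    rw [PySem.List.pyRange_neg_one_eq_nil (by omega)]
    simp [findLoop, search]
  | succ n ih =>
    have hcons : PySem.List.pyRange ((n + 1 : Nat) : Int) 0 (-1) =
        ((n + 1 : Nat) : Int) :: PySem.List.pyRange (((n + 1 : Nat) : Int) - 1) 0 (-1) :=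
      PySem.List.pyRange_neg_one_cons (by push_cast; omega)
    have hstep : (((n + 1 : Nat) : Int) - 1) = (n : Int) := by push_cast; ring
    rw [hcons, hstep, findLoop, search]
    set a : Int := ((n + 1 : Nat) : Int) with ha
    have hapos : 0 < a := by rw [ha]; push_cast; omega
    have hbnn : 0 ≤ PySem.Int.floordiv factor a := by
      rw [PySem.Int.le_floordiv_iff_mul_le hapos]
      simpa using hf
    have hgb : findGcd a (PySem.Int.floordiv factor a) =
        (Int.gcd a (PySem.Int.floordiv factor a) : Int) :=
      findGcd_eq_gcd _ _ (by omega) hbnn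
    by_cases hp : Pred factor a
    · obtain ⟨hmod, hgcd⟩ := hp
      have hpA : PySem.Int.mod factor a = 0 ∧ Int.gcd a (PySem.Int.floordiv factor a) = 1 :=
        ⟨hmod, hgcd⟩
      rw [if_pos hmod, if_pos (show findGcd a (PySem.Int.floordiv factor a) = 1 by
            rw [hgb, hgcd]; norm_num), if_pos hpA]
      simp
    · by_cases hmod : PySem.Int.mod factor a = 0
      · have hgcd1 : ¬ (findGcd a (PySem.Int.floordiv factor a) = 1) := by
          intro hone
          rw [hgb] at hone
          exact hp ⟨hmod, by exact_mod_cast hone⟩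
        have hp' : ¬ (PySem.Int.mod factor a = 0 ∧
            Int.gcd a (PySem.Int.floordiv factor a) = 1) := hp
        rw [if_pos hmod, if_neg hgcd1, if_neg hp', ih]
      · have hp' : ¬ (PySem.Int.mod factor a = 0 ∧
            Int.gcd a (PySem.Int.floordiv factor a) = 1) := hp
        rw [if_neg hmod, if_neg hp', ih]

-- the Int-side test is the Nat-side unitary-divisor predicate
theorem pred_iff_UD (f x : Nat) (hx : 1 ≤ x) : Pred (f : Int) (x : Int) ↔ UD f x := by
  unfold Pred UD
  rw [PySem.Int.mod_natCast, PySem.Int.floordiv_natCast]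
  constructor
  · rintro ⟨h1, h2⟩
    refine ⟨Nat.dvd_of_mod_eq_zero (by exact_mod_cast h1), ?_⟩
    simpa [Int.gcd] using h2
  · rintro ⟨h1, h2⟩
    refine ⟨?_, ?_⟩
    · have hmod : f % x = 0 := by
        obtain ⟨c, rfl⟩ := h1
        exact Nat.mul_mod_right x c
      simp [hmod]
    · exact h2

-- pyPullPow extracts the full power of d
theorem pyPullPow_spec (d : Nat) (m : Nat) (q0 : Nat) (h2 : 2 ≤ d) (hm : 0 < m) :
    ∃ k m', pyPullPow d m q0 = (q0 * d ^ k, m') ∧ m = d ^ k * m' ∧ ¬ d ∣ m' ∧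
      (d ∣ m → 1 ≤ k) := by
  induction m using Nat.strong_induction_on generalizing q0 with
  | _ m ih =>
    by_cases hd : m % d = 0
    · rw [pyPullPow, dif_pos ⟨hd, h2, hm⟩]
      have hdvd : d ∣ m := Nat.dvd_of_mod_eq_zero hd
      have hmd : 0 < m / d := Nat.div_pos (Nat.le_of_dvd hm hdvd) (by omega)
      obtain ⟨k, m', heq, hprod, hnd, _⟩ :=
        ih (m / d) (Nat.div_lt_self hm h2) (q0 * d) hmd
      refine ⟨k + 1, m', ?_, ?_, hnd, fun _ => by omega⟩
      · rw [heq]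
        congr 1
        rw [pow_succ]
        ring
      · have hm' : m = d * (m / d) := (Nat.mul_div_cancel' hdvd).symm
        rw [hm', hprod, pow_succ]
        ring
    · rw [pyPullPow, dif_neg (by simp [hd])]
      have hnd : ¬ d ∣ m := fun hdvd => hd (by obtain ⟨c, rfl⟩ := hdvd; exact Nat.mul_mod_right d c)
      exact ⟨0, m, by simp, by simp, hnd, fun hdvd => (hnd hdvd).elim⟩

-- the factorization loop produces good blocks
theorem pyBlocks_good : ∀ (m d : Nat), 1 ≤ m → 2 ≤ d →
    (∀ k, 2 ≤ k → k < d → ¬ k ∣ m) → GoodBlocks (pyBlocks m d) m := by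
  intro m d
  induction m, d using pyBlocks.induct with
  | case1 m d hg hd r ih =>
    intro hm h2 hinv
    have hdvd : d ∣ m := Nat.dvd_of_mod_eq_zero hd
    have hprime : d.Prime :=
      Nat.prime_def_lt'.mpr ⟨h2, fun k hk2 hkd hkdvd => hinv k hk2 hkd (hkdvd.trans hdvd)⟩
    obtain ⟨k, m', heq, hprod, hndvd, hk1⟩ := pyPullPow_spec d m 1 h2 (by omega)
    have hk : 1 ≤ k := hk1 hdvd
    have hm' : 1 ≤ m' := by
      rcases Nat.eq_zero_or_pos m' with h0 | h0
      · rw [h0, mul_zero] at hprod; omega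
      · exact h0
    have hm'dvd : m' ∣ m := ⟨d ^ k, by rw [hprod]; ring⟩
    have hinv' : ∀ j, 2 ≤ j → j < d + 1 → ¬ j ∣ m' := by
      intro j hj2 hjd hjdvd
      rcases (by omega : j < d ∨ j = d) with h | h
      · exact hinv j hj2 h (hjdvd.trans hm'dvd)
      · subst h; exact hndvd hjdvd
    have hreq : r = (1 * d ^ k, m') := heq
    have ihg : GoodBlocks (pyBlocks m' (d + 1)) m' := by
      rw [hreq] at ih
      exact ih hm' (by omega) hinv'
    obtain ⟨hprodr, hppr, hpwr⟩ := ihg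
    rw [pyBlocks, dif_pos hg, dif_pos hd]
    simp only [heq]
    show GoodBlocks ((1 * d ^ k) :: pyBlocks m' (d + 1)) m
    refine ⟨?_, ?_, ?_⟩
    · rw [List.prod_cons, hprodr, one_mul]; exact hprod.symm
    · intro q hq
      rcases List.mem_cons.mp hq with h | h
      · exact ⟨d, k, hprime, hk, by rw [h, one_mul]⟩
      · exact hppr q h
    · refine List.Pairwise.cons ?_ hpwr
      intro b hb
      have hbdvd : b ∣ m' := hprodr ▸ List.dvd_prod hb
      have hdb : ¬ d ∣ b := fun hdd => hndvd (hdd.trans hbdvd)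
      have hcop : Nat.Coprime d b := (hprime.coprime_iff_not_dvd).mpr hdb
      have hpow : Nat.Coprime (d ^ k) b := Nat.Coprime.pow_left k hcop
      simpa [one_mul] using hpow
  | case2 m d hg hd ih =>
    intro hm h2 hinv
    rw [pyBlocks, dif_pos hg, dif_neg hd]
    refine ih hm (by omega) ?_
    intro k hk2 hkd hkm
    rcases (by omega : k < d ∨ k = d) with h | h
    · exact hinv k hk2 h hkm
    · subst h
      exact hd (by obtain ⟨c, rfl⟩ := hkm; exact Nat.mul_mod_right k c)
  | case3 m d hg h1 =>
    intro hm h2 hinv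
    rw [pyBlocks, dif_neg hg, if_pos h1]
    have hddm : ¬ d * d ≤ m := fun hle => hg ⟨hle, h2⟩
    have hprime : m.Prime := by
      by_contra hnp
      have hp := Nat.minFac_prime (show m ≠ 1 by omega)
      have hdvd := Nat.minFac_dvd m
      have hge : d ≤ m.minFac := by
        by_contra hlt
        exact hinv m.minFac hp.two_le (by omega) hdvd
      have hsq := Nat.minFac_sq_le_self (by omega) hnp
      have : d * d ≤ m := by nlinarith [sq_nonneg m.minFac]
      omega
    refine ⟨by simp, ?_, by simp⟩
    intro q hq
    simp at hq
    subst hq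
    exact ⟨q, 1, hprime, le_refl 1, (pow_one q).symm⟩
  | case4 m d hg h1 =>
    intro hm h2 hinv
    rw [pyBlocks, dif_neg hg, if_neg h1]
    have : m = 1 := by omega
    subst this
    exact ⟨rfl, by simp, by simp⟩

-- subset products of good blocks are exactly the unitary divisors
theorem isSubProd_iff_UD : ∀ (bs : List Nat) (m x : Nat), GoodBlocks bs m → 1 ≤ m →
    (IsSubProd bs x ↔ UD m x) := by
  intro bs
  induction bs with
  | nil =>
    intro m x hgood hm
    obtain ⟨hprod, -, -⟩ := hgood
    simp at hprod
    subst hprod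
    constructor
    · intro h
      cases h
      exact ⟨one_dvd 1, by simp⟩
    · rintro ⟨h1, -⟩
      have : x = 1 := Nat.dvd_one.mp h1
      subst this
      exact IsSubProd.nil
  | cons q bs ih =>
    intro m x hgood hm
    obtain ⟨hprod, hpp, hpw⟩ := hgood
    rw [List.prod_cons] at hprod
    obtain ⟨p, e, hp, he, hqe⟩ := hpp q List.mem_cons_self
    set r := bs.prod with hr
    subst hprod
    have hq0 : q ≠ 0 := by rintro rfl; simp at hm
    have hr0 : r ≠ 0 := by rintro h0; rw [h0, mul_zero] at hm; omega
    have hqcop : ∀ b ∈ bs, Nat.Coprime q b := (List.pairwise_cons.mp hpw).1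
    have hqr : Nat.Coprime q r := Nat.coprime_list_prod_right_iff.mpr hqcop
    have hgoodbs : GoodBlocks bs r :=
      ⟨rfl, fun b hb => hpp b (List.mem_cons_of_mem q hb), (List.pairwise_cons.mp hpw).2⟩
    have IH := fun y => ih r y hgoodbs (by omega)
    have hpq : p ∣ q := by rw [hqe]; exact dvd_pow_self p (by omega)
    have hpr : ¬ p ∣ r := fun hd =>
      (hp.coprime_iff_not_dvd.mp (Nat.Coprime.coprime_dvd_left hpq hqr)) hd
    constructor
    · intro h
      cases h with
      | skip _ hsub =>
        obtain ⟨hxr, hcop⟩ := (IH x).mp hsub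
        have hpx : ¬ p ∣ x := fun hd => hpr (hd.trans hxr)
        have hxq : Nat.Coprime x q := by
          rw [hqe]
          exact Nat.Coprime.pow_right e (Nat.coprime_comm.mp (hp.coprime_iff_not_dvd.mpr hpx))
        refine ⟨Dvd.dvd.mul_left hxr q, ?_⟩
        rw [Nat.mul_div_assoc q hxr]
        exact Nat.Coprime.mul_right hxq hcop
      | take _ hsub =>
        rename_i u
        obtain ⟨hur, hcop⟩ := (IH u).mp hsub
        refine ⟨mul_dvd_mul_left q hur, ?_⟩
        rw [Nat.mul_div_mul_left r u (by omega : 0 < q)]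
        refine Nat.Coprime.mul_left ?_ hcop
        exact Nat.Coprime.coprime_dvd_right ⟨u, (Nat.div_mul_cancel hur).symm⟩ hqr
    · rintro ⟨hxm, hcop⟩
      have hx1 : 0 < x := Nat.pos_of_dvd_of_pos hxm hm
      by_cases hpx : p ∣ x
      · have hx0 : x ≠ 0 := by omega
        have hmx0 : (q * r) / x ≠ 0 := (Nat.div_pos (Nat.le_of_dvd hm hxm) hx1).ne'
        have hpmx : ¬ p ∣ ((q * r) / x) := by
          intro hd
          have hpg : p ∣ Nat.gcd x ((q * r) / x) := Nat.dvd_gcd hpx hd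
          rw [hcop] at hpg
          exact hp.one_lt.ne' (Nat.dvd_one.mp hpg)
        have hfact : x.factorization p = e := by
          have hmul : x * ((q * r) / x) = q * r := Nat.mul_div_cancel' hxm
          have h1 : (q * r).factorization p =
              x.factorization p + ((q * r) / x).factorization p := by
            have h1' : (x * ((q * r) / x)).factorization p =
                x.factorization p + ((q * r) / x).factorization p := by
              rw [Nat.factorization_mul hx0 hmx0]; rfl
            rw [hmul] at h1'
            exact h1'
          have h2 : ((q * r) / x).factorization p = 0 :=
            Nat.factorization_eq_zero_of_not_dvd hpmx
          have h3 : (q * r).factorization p = e := by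
            rw [Nat.factorization_mul hq0 hr0]
            show q.factorization p + r.factorization p = e
            rw [hqe, Nat.factorization_eq_zero_of_not_dvd hpr]
            simp [hp.factorization_pow]
          omega
        have hqx : q ∣ x := by
          rw [hqe]
          exact (hp.pow_dvd_iff_le_factorization hx0).mpr (le_of_eq hfact.symm)
        obtain ⟨u, hxu⟩ := hqx
        have hpu : ¬ p ∣ u := by
          intro hd
          have hpow : p ^ (e + 1) ∣ x := by
            rw [hxu, hqe, pow_succ]
            exact mul_dvd_mul dvd_rfl hd
          have := (hp.pow_dvd_iff_le_factorization hx0).mp hpow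
          omega
        have hur : u ∣ r := by
          have hmm : q * u ∣ q * r := hxu ▸ hxm
          exact (mul_dvd_mul_iff_left (show q ≠ 0 from hq0)).mp hmm
        have hdiv : (q * r) / x = r / u := by
          rw [hxu, Nat.mul_div_mul_left r u (by omega : 0 < q)]
        have hcu : Nat.Coprime u (r / u) := by
          have hux : u ∣ x := ⟨q, by rw [hxu]; ring⟩
          rw [hdiv] at hcop
          exact Nat.Coprime.coprime_dvd_left hux hcop
        have hsub := (IH u).mpr ⟨hur, hcu⟩
        rw [hxu]
        exact IsSubProd.take q hsub
      · have hxq : Nat.Coprime x q := by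
          rw [hqe]
          exact Nat.Coprime.pow_right e (Nat.coprime_comm.mp (hp.coprime_iff_not_dvd.mpr hpx))
        have hxr : x ∣ r := hxq.dvd_of_dvd_mul_left hxm
        have hcr : Nat.Coprime x (r / x) := by
          rw [Nat.mul_div_assoc q hxr] at hcop
          exact Nat.Coprime.coprime_dvd_right (dvd_mul_left (r / x) q) hcop
        exact IsSubProd.skip q ((IH x).mpr ⟨hxr, hcr⟩)

-- the foldl in Source B enumerates exactly the subset products
theorem mem_foldl_subprod : ∀ (bs : List Nat) (acc : List Nat) (x : Nat),
    x ∈ bs.foldl (fun ps q => ps ++ ps.map (fun p => p * q)) acc ↔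
      ∃ p ∈ acc, ∃ u, IsSubProd bs u ∧ x = p * u := by
  intro bs
  induction bs with
  | nil =>
    intro acc x
    simp only [List.foldl_nil]
    constructor
    · intro hx
      exact ⟨x, hx, 1, IsSubProd.nil, (mul_one x).symm⟩
    · rintro ⟨p, hp, u, hu, rfl⟩
      cases hu
      simpa using hp
  | cons q bs ih =>
    intro acc x
    rw [List.foldl_cons, ih]
    constructor
    · rintro ⟨p, hp, u, hu, rfl⟩
      rcases List.mem_append.mp hp with h | h
      · exact ⟨p, h, u, IsSubProd.skip q hu, rfl⟩
      · obtain ⟨p0, hp0, rfl⟩ := List.mem_map.mp h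
        exact ⟨p0, hp0, q * u, IsSubProd.take q hu, by ring⟩
    · rintro ⟨p, hp, u, hu, rfl⟩
      cases hu with
      | skip _ h => exact ⟨p, List.mem_append.mpr (Or.inl hp), _, h, rfl⟩
      | take _ h =>
        rename_i u0
        exact ⟨p * q, List.mem_append.mpr (Or.inr (List.mem_map.mpr ⟨p, hp, rfl⟩)),
          u0, h, by ring⟩

-- Python's max over the filtered products
theorem max?_filter_eq (L : List Nat) (s m0 : Nat) (hm : m0 ∈ L) (hms : m0 ≤ s)
    (hmax : ∀ y ∈ L, y ≤ s → y ≤ m0) :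
    PySem.List.max? (L.filter (fun p => p ≤ s)) (fun p => p) = some m0 := by
  have hmem : m0 ∈ L.filter (fun p => p ≤ s) := List.mem_filter.mpr ⟨hm, by simpa using hms⟩
  cases hq : PySem.List.max? (L.filter (fun p => p ≤ s)) (fun p => p) with
  | none =>
    rw [PySem.List.max?_eq_none_iff] at hq
    simp [hq] at hmem
  | some y =>
    have hy := PySem.List.max?_mem hq
    obtain ⟨hyL, hys⟩ := List.mem_filter.mp hy
    have h1 : y ≤ m0 := hmax y hyL (by simpa using hys)
    have h2 : m0 ≤ y := PySem.List.max?_isMax hq m0 hmem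
    congr 1
    omega

-- ===== VERDICT (by name: the statement is the Claim_ definition above) =====
theorem find_spec : Claim_equal_find := by
  intro g l _ hpre
  obtain ⟨hg, hf0⟩ := hpre
  show find g l = find_alt g l
  simp only [find, find_alt]
  set factor := PySem.Int.floordiv l g with hfac
  set f : Nat := factor.toNat with hfdef
  have hfc : factor = (f : Int) := (Int.toNat_of_nonneg hf0).symm
  have hsq : pySqrtInt factor = ((Nat.sqrt f : Nat) : Int) := rfl
  have hA : findLoop factor g (PySem.List.pyRange (pySqrtInt factor) 0 (-1)) =
      (search factor (Nat.sqrt f)).map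
        (fun a => (a * g, PySem.Int.floordiv factor a * g)) := by
    rw [hsq]
    conv_lhs => rw [hfc]
    conv_rhs => rw [hfc]
    exact findLoop_eq (f : Int) g (by exact_mod_cast Nat.zero_le f) (Nat.sqrt f)
  rw [hA]
  by_cases hz : factor = 0
  · have hf00 : f = 0 := by rw [hfdef, hz]; rfl
    rw [if_pos hz, hf00, Nat.sqrt_zero]
    simp [search]
  · rw [if_neg hz]
    have hf1 : 1 ≤ f := by
      rcases Nat.eq_zero_or_pos f with h0 | h0
      · exact absurd (by rw [hfc, h0]; rfl : factor = 0) hz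
      · exact h0
    set s := Nat.sqrt f with hs
    have hs1 : 1 ≤ s := Nat.sqrt_pos.mpr (by omega)
    set blocks := pyBlocks f 2 with hb
    set products := blocks.foldl (fun ps q => ps ++ ps.map (fun p => p * q)) [1] with hpds
    have hgood : GoodBlocks blocks f := pyBlocks_good f 2 hf1 (le_refl 2) (by intro k hk2 hkd; omega)
    have hmemiff : ∀ y, y ∈ products ↔ UD f y := by
      intro y
      rw [hpds, mem_foldl_subprod]
      constructor
      · rintro ⟨p, hp, u, hu, rfl⟩
        simp only [List.mem_singleton] at hp
        rw [hp, one_mul]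
        exact (isSubProd_iff_UD blocks f u hgood (by omega)).mp hu
      · intro hUD
        exact ⟨1, by simp, y, (isSubProd_iff_UD blocks f y hgood (by omega)).mpr hUD,
          (one_mul y).symm⟩
    cases hsearch : search factor s with
    | none =>
      exfalso
      have h1 : Pred factor 1 := by
        rw [hfc]
        have := (pred_iff_UD f 1 (le_refl 1)).mpr ⟨one_dvd f, by simp⟩
        simpa using this
      exact search_none factor s hsearch 1 (le_refl 1) (by exact_mod_cast hs1) h1
    | some m0 =>
      obtain ⟨hpm, hm1, hms⟩ := search_some factor s m0 hsearch
      set x0 := m0.toNat with hx0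
      have hm0c : m0 = (x0 : Int) := (Int.toNat_of_nonneg (by omega)).symm
      have hx01 : 1 ≤ x0 := by omega
      have hx0s : x0 ≤ s := by omega
      have hUD0 : UD f x0 := by
        apply (pred_iff_UD f x0 hx01).mp
        rw [← hm0c, ← hfc]
        exact hpm
      have hmax : ∀ y ∈ products, y ≤ s → y ≤ x0 := by
        intro y hy hys
        by_contra hgt
        have hUDy : UD f y := (hmemiff y).mp hy
        have hy1 : 1 ≤ y := Nat.pos_of_dvd_of_pos hUDy.1 (by omega)
        have hPy : Pred factor ((y : Nat) : Int) := by
          rw [hfc]; exact (pred_iff_UD f y hy1).mpr hUDy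
        exact search_max factor s m0 hsearch (y : Int) (by omega) (by exact_mod_cast hys) hPy
      have hmx := max?_filter_eq products s x0 ((hmemiff x0).mpr hUD0) hx0s hmax
      rw [hmx]
      simp only [Option.map_some]
      rw [hm0c, hfc, PySem.Int.floordiv_natCast]
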